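-- pv_equiv track=rewrite | github.com/janeyeon/attention_modulation_lcm | .ipynb_checkpoints/_utils-checkpoint.py | filter_contained_lists_with_indices
-- ===== SOURCE A (Python) =====
-- def filter_contained_lists_with_indices(lists):
--     result = []
--     excluded_indices = []
--
--     for i, list1 in enumerate(lists):
--         is_contained = False
--         for j, list2 in enumerate(lists):
--             if i != j and all(elem in list2 for elem in list1):
--                 is_contained = True
--                 excluded_indices.append(i)
--                 break
--         if not is_contained:
--             result.append(list1)
--
--     return result, excluded_indices
-- ===== SOURCE B (Python) =====
-- def filter_contained_lists_with_indices(lists):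
--     # Collapse each list to a canonical key (sorted distinct elements); decide
--     # exclusion once per distinct key, then collect outputs in two passes.
--     keys = [tuple(sorted(set(l))) for l in lists]
--     uniq = []
--     for k in keys:
--         if k not in uniq:
--             uniq.append(k)
--     dead = {}
--     for k in uniq:
--         dead[k] = keys.count(k) > 1 or any(g != k and all(x in g for x in k) for g in uniq)
--     result = [l for l, k in zip(lists, keys) if not dead[k]]
--     excluded_indices = [i for i, k in enumerate(keys) if dead[k]]
--     return result, excluded_indices
-- ===== Notes on version B (the rewrite author's own statement) =====
-- stated objective: alternative
-- what changed: B canonicalises every list to its sorted distinct-element key, decides exclusion once per distinct key (duplicate key or a distinct superset key among the distinct keys) memoised in a dict, and then collects result and excluded indices in two comprehension passes, instead of A's all-pairs index-vs-index containment scan interleaved with output building.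
import Mathlib
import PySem

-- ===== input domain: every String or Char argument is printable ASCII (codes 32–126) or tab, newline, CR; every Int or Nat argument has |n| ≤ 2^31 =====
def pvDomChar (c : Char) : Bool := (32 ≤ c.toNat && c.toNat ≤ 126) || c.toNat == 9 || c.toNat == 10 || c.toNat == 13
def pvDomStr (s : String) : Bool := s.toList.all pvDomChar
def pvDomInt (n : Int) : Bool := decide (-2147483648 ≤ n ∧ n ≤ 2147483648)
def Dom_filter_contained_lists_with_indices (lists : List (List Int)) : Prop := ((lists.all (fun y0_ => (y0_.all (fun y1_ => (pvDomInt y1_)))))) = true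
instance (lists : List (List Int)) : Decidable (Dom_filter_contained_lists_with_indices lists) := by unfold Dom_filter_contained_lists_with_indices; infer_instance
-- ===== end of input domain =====

-- B replaces A's all-pairs index scan by canonical sorted-set keys decided once per
-- distinct key (duplicate count or proper-superset among distinct keys); alternative
-- decomposition, same return value.


-- ===== PORT A =====
-- A's inner loop sets is_contained and appends i at the FIRST matching j and breaks,
-- so its net effect on the state is exactly one 'any' test deciding both appends.
def filter_contained_lists_with_indices (lists : List (List Int)) : List (List Int) × List Int :=
  (PySem.List.enumerate lists).foldl
    (fun st p =>
      if (PySem.List.enumerate lists).any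
          (fun q => decide (p.1 ≠ q.1) && p.2.all (fun e => q.2.contains e)) then
        (st.1, st.2 ++ [p.1])
      else
        (st.1 ++ [p.2], st.2))
    ([], [])

-- ===== PORT B =====
-- tuple(sorted(set(l)))
def pvKey (l : List Int) : List Int :=
  PySem.List.sorted (PySem.Set.ofList l) (fun x => x) false

-- keys.count(k) > 1 or any(g != k and all(x in g for x in k) for g in uniq)
def pvDead (keys uniq : List (List Int)) (k : List Int) : Bool :=
  decide (1 < keys.count k) || uniq.any (fun g => decide (g ≠ k) && k.all (fun x => g.contains x))

def filter_contained_lists_with_indices_alt (lists : List (List Int)) : List (List Int) × List Int :=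
  let keys := lists.map pvKey
  let uniq : PySem.Set (List Int) := PySem.Set.ofList keys   -- the 'k not in uniq: append' loop
  let dead : PySem.Dict (List Int) Bool :=
    uniq.foldl (fun d k => d.insert k (pvDead keys uniq k)) PySem.Dict.empty
  let result := (lists.zip keys).foldl
    (fun acc q => if !(dead.getD q.2 false) then acc ++ [q.1] else acc) []
  let excluded := (PySem.List.enumerate keys).foldl
    (fun acc p => if dead.getD p.2 false then acc ++ [p.1] else acc) []
  (result, excluded)

-- ===== PRECONDITION & SPEC =====
def Spec_filter_contained_lists_with_indices (lists : List (List Int)) (out : List (List Int) × List Int) : Prop := out = filter_contained_lists_with_indices_alt lists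
instance (lists : List (List Int)) (out : List (List Int) × List Int) : Decidable (Spec_filter_contained_lists_with_indices lists out) := by unfold Spec_filter_contained_lists_with_indices; infer_instance

-- ===== CLAIM (what is proved, stated in full; the proofs are below) =====
def Claim_equal_filter_contained_lists_with_indices : Prop := ∀ (lists : List (List Int)), Dom_filter_contained_lists_with_indices lists → Spec_filter_contained_lists_with_indices lists (filter_contained_lists_with_indices lists)

-- ===== LEMMAS AND PROOFS =====

lemma mem_pvKey (l : List Int) (x : Int) : x ∈ pvKey l ↔ x ∈ l := by
  simp [pvKey, PySem.List.mem_sorted, PySem.Set.mem_ofList]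

-- lookup in the dict built by B's 'for k in uniq: dead[k] = f(k)' loop
lemma getD_deadFold (u : List (List Int)) (f : List Int → Bool) (d : PySem.Dict (List Int) Bool)
    (k : List Int) :
    (u.foldl (fun d k => d.insert k (f k)) d).getD k false
      = if k ∈ u then f k else d.getD k false := by
  induction u generalizing d with
  | nil => simp
  | cons a t ih =>
    simp only [List.foldl_cons, ih, PySem.Dict.getD_insert]
    by_cases h : k ∈ t
    · simp [h]
    · by_cases hk : k = a <;> simp [h, hk]

lemma enumerate_map (f : List Int → List Int) (lists : List (List Int)) (s : Int) :
    PySem.List.enumerate (lists.map f) s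
      = (PySem.List.enumerate lists s).map (fun p => (p.1, f p.2)) := by
  induction lists generalizing s with
  | nil => simp [PySem.List.enumerate_nil]
  | cons a t ih => simp [PySem.List.enumerate_cons, ih]

-- List.count is the same under any lawful BEq instance (bridges to Mathlib's DecidableEq count)
lemma count_instance_eq {α : Type} [DecidableEq α] [inst : BEq α] [LawfulBEq α]
    (l : List α) (v : α) : @List.count α instBEqOfDecidableEq v l = @List.count α inst v l := by
  induction l with
  | nil => rfl
  | cons a t ih => simp [List.count_cons, ih]

-- the heart: B's per-key decision agrees with A's per-index scan
lemma pvDead_eq_scan (lists : List (List Int)) (n : Nat) (hn : n < lists.length) :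
    pvDead (lists.map pvKey) (PySem.Set.ofList (lists.map pvKey)) (pvKey lists[n])
      = (PySem.List.enumerate lists).any
          (fun q => decide ((n : Int) ≠ q.1) && (lists[n]).all (fun e => q.2.contains e)) := by
  rw [Bool.eq_iff_iff]
  simp only [pvDead, Bool.or_eq_true, decide_eq_true_eq, List.any_eq_true,
    Bool.and_eq_true, List.all_eq_true, PySem.List.mem_enumerate_iff,
    PySem.Set.mem_ofList, List.mem_map, List.contains_eq_mem]
  constructor
  · rintro (hcount | ⟨g, ⟨l', hl', hgl'⟩, hne, hsub⟩)
    · -- a duplicate key: some other index carries the same key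
      have hcnt : @List.count _ instBEqOfDecidableEq (pvKey lists[n]) (lists.map pvKey)
          = List.count (pvKey lists[n]) (lists.map pvKey) :=
        (count_instance_eq (lists.map pvKey) (pvKey lists[n]))
      obtain ⟨a, b, hab, ha, hb⟩ :=
        (List.duplicate_iff_exists_distinct_get
            (l := lists.map pvKey) (x := pvKey lists[n])).mp
          ((List.duplicate_iff_two_le_count
            (l := lists.map pvKey) (x := pvKey lists[n])).mpr (by omega))
      have hane : (a : Nat) ≠ (b : Nat) := by omega
      have key_a : pvKey lists[n] = pvKey lists[(a : Nat)] := by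
        simpa [List.get_eq_getElem, List.getElem_map] using ha
      have key_b : pvKey lists[n] = pvKey lists[(b : Nat)] := by
        simpa [List.get_eq_getElem, List.getElem_map] using hb
      have hblen : (b : Nat) < lists.length := by
        have := b.isLt; simpa using this
      have halen : (a : Nat) < lists.length := by
        have := a.isLt; simpa using this
      by_cases hna : n = (a : Nat)
      · refine ⟨((0 : Int) + (((b : Nat) : Int)), lists[(b : Nat)]), ⟨(b : Nat), hblen, rfl⟩, ?_, ?_⟩
        · subst hna; simp; omega
        · intro e he
          have : e ∈ pvKey lists[n] := (mem_pvKey _ _).mpr he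
          rw [key_b] at this
          simpa using (mem_pvKey _ _).mp this
      · refine ⟨((0 : Int) + (((a : Nat) : Int)), lists[(a : Nat)]), ⟨(a : Nat), halen, rfl⟩, ?_, ?_⟩
        · simp; omega
        · intro e he
          have : e ∈ pvKey lists[n] := (mem_pvKey _ _).mpr he
          rw [key_a] at this
          simpa using (mem_pvKey _ _).mp this
    · -- a strictly larger distinct key: locate an index carrying it
      subst hgl'
      obtain ⟨m, hm, hml⟩ := List.mem_iff_getElem.mp hl'
      refine ⟨((0 : Int) + (((m : Nat) : Int)), lists[m]), ⟨m, hm, rfl⟩, ?_, ?_⟩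
      · have : m ≠ n := by
          intro h; subst h; rw [hml] at hne; exact hne rfl
        simp; omega
      · intro e he
        have h1 : e ∈ pvKey lists[n] := (mem_pvKey _ _).mpr he
        have h2 : e ∈ l' := (mem_pvKey _ _).mp (hsub e h1)
        simpa [hml] using h2
  · rintro ⟨q, ⟨m, hm, rfl⟩, hne, hsub⟩
    have hnm : n ≠ m := by simpa using hne
    by_cases heq : pvKey lists[m] = pvKey lists[n]
    · -- equal keys at two distinct positions: the key occurs twice
      left
      have hlen : (lists.map pvKey).length = lists.length := by simp
      have hd : List.Duplicate (pvKey lists[n]) (lists.map pvKey) := by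
        rw [List.duplicate_iff_exists_distinct_get]
        rcases Nat.lt_or_ge n m with h | h
        · exact ⟨⟨n, by omega⟩, ⟨m, by omega⟩, h, by simp, by simp [heq]⟩
        · have h' : m < n := by omega
          exact ⟨⟨m, by omega⟩, ⟨n, by omega⟩, h', by simp [heq], by simp⟩
      have h2 := List.duplicate_iff_two_le_count.mp hd
      have hcnt := count_instance_eq (lists.map pvKey) (pvKey lists[n])
      omega
    · -- a distinct superset key
      right
      refine ⟨pvKey lists[m], ⟨lists[m], List.getElem_mem hm, rfl⟩, heq, ?_⟩
      intro x hx
      have : x ∈ lists[n] := (mem_pvKey _ _).mp hx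
      exact (mem_pvKey _ _).mpr (hsub x this)

-- ===== VERDICT (by name: the statement is the Claim_ definition above) =====
theorem filter_contained_lists_with_indices_spec : Claim_equal_filter_contained_lists_with_indices := by
  intro lists _
  show _ = _
  unfold filter_contained_lists_with_indices filter_contained_lists_with_indices_alt
  dsimp only
  -- notation for the shared pieces
  set keys := lists.map pvKey with hkeys
  set uniq := PySem.Set.ofList keys with huniq
  set dead := uniq.foldl (fun d k => d.insert k (pvDead keys uniq k)) PySem.Dict.empty with hdead
  -- the lookup B's comprehensions do, as a function of the key
  have hlook : ∀ m : Nat, (hm : m < lists.length) →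
      dead.getD (pvKey lists[m]) false = pvDead keys uniq (pvKey lists[m]) := by
    intro m hm
    rw [hdead, getD_deadFold]
    have : pvKey lists[m] ∈ uniq := by
      rw [huniq, PySem.Set.mem_ofList, hkeys]
      exact List.mem_map.mpr ⟨lists[m], List.getElem_mem hm, rfl⟩
    simp [this]
  -- A's single loop with a pair state is two independent append loops
  have hbodyA : ∀ (c : Int × List Int → Bool),
      (fun (st : List (List Int) × List Int) (p : Int × List Int) =>
        if c p then (st.1, st.2 ++ [p.1]) else (st.1 ++ [p.2], st.2))
      = (fun st p =>
        ((fun (a : List (List Int)) (p : Int × List Int) => if !(c p) then a ++ [p.2] else a) st.1 p,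
         (fun (a : List Int) (p : Int × List Int) => if c p then a ++ [p.1] else a) st.2 p)) := by
    intro c; funext st p; cases h : c p <;> simp [h]
  rw [hbodyA (fun p => (PySem.List.enumerate lists).any (fun q => decide (p.1 ≠ q.1) && p.2.all (fun e => q.2.contains e)))]
  rw [PySem.List.foldl_prod_mk
    (f := fun (a : List (List Int)) (p : Int × List Int) =>
      if (!(PySem.List.enumerate lists).any
          (fun q => decide (p.1 ≠ q.1) && p.2.all (fun e => q.2.contains e))) = true then
        a ++ [p.2] else a)
    (g := fun (a : List Int) (p : Int × List Int) =>
      if ((PySem.List.enumerate lists).any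
          (fun q => decide (p.1 ≠ q.1) && p.2.all (fun e => q.2.contains e))) = true then
        a ++ [p.1] else a)]
  rw [PySem.List.foldl_append_if, PySem.List.foldl_append_if,
    PySem.List.foldl_append_if, PySem.List.foldl_append_if]
  -- replace A's per-index scan by the key lookup, pointwise on the members of enumerate
  have hcongr : ∀ (p : Int × List Int), p ∈ PySem.List.enumerate lists →
      ((PySem.List.enumerate lists).any
        (fun q => decide (p.1 ≠ q.1) && p.2.all (fun e => q.2.contains e)))
        = dead.getD (pvKey p.2) false := by
    rintro p hp
    rw [PySem.List.mem_enumerate_iff] at hp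
    obtain ⟨m, hm, rfl⟩ := hp
    rw [hlook m hm, hkeys, huniq, hkeys, pvDead_eq_scan lists m hm]
    simp
  -- result components
  refine Prod.ext ?_ ?_
  · show [] ++ _ = [] ++ _
    congr 1
    rw [List.filter_congr (q := fun p => !dead.getD (pvKey p.2) false)
      (by intro x hx; rw [hcongr x hx])]
    have : (fun (p : Int × List Int) => !dead.getD (pvKey p.2) false)
        = (fun l => !dead.getD (pvKey l) false) ∘ Prod.snd := rfl
    rw [this, ← List.filter_map, PySem.List.map_snd_enumerate]
    rw [hkeys, show lists.zip (lists.map pvKey) = lists.map (fun l => (l, pvKey l)) from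
      (List.map_prod_left_eq_zip (f := pvKey) (l := lists)).symm]
    rw [List.filter_map, List.map_map]
    simp [Function.comp_def]
  · show [] ++ _ = [] ++ _
    congr 1
    rw [List.filter_congr (q := fun p => dead.getD (pvKey p.2) false)
      (by intro x hx; rw [hcongr x hx])]
    rw [hkeys, enumerate_map pvKey lists 0, List.filter_map, List.map_map]
    rfl
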